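-- pv_equiv track=rewrite | github.com/WesterfieldCRL/CRG-browser | backend/app/main.py | compare_sequences
-- ===== SOURCE A (Python) =====
-- from typing import Optional, List, Annotated, Dict
--
-- def compare_sequences(sequences: List[str]) -> List[bool]:
--     # Compare sequences character by character and return a list indicating if all characters at each position are identical
--     if not sequences:
--         return []
--
--     length = len(sequences[0])
--     comparison = []
--
--     for i in range(length):
--         chars_at_pos_i = [seq[i] for seq in sequences]
--         all_same = len(set(chars_at_pos_i)) == 1
--         comparison.append(all_same)
--
--     return comparison
-- ===== SOURCE B (Python) =====
-- def compare_sequences(sequences):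
--     # Flag-array sweep: start all-True, clear positions where any later sequence disagrees with the first.
--     if not sequences:
--         return []
--     first = sequences[0]
--     length = len(first)
--     result = [True] * length
--     for seq in sequences[1:]:
--         for i in range(length):
--             if seq[i] != first[i]:
--                 result[i] = False
--     return result
-- ===== Notes on version B (the rewrite author's own statement) =====
-- stated objective: alternative
-- what changed: A loops per position and builds a set of the characters at that position to test len(set)==1; B starts from a [True]*len(first) flag array and sweeps the remaining sequences, clearing a position whenever a character disagrees with the first sequence, so no per-position list or set is ever built.
-- outside the precondition, e.g. on compare_sequences(['ab', 'a']): A raises IndexError, B raises IndexError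
import Mathlib
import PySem

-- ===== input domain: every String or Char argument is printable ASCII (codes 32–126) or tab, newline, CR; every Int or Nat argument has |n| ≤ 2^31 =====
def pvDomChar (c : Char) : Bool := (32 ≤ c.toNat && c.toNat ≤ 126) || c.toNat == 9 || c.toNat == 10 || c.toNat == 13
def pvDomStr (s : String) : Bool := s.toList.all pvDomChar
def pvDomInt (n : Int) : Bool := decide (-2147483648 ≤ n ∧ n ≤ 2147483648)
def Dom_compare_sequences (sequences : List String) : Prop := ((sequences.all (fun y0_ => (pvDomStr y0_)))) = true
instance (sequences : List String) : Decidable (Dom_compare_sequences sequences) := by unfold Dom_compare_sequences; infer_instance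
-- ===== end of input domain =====

-- B replaces A's per-position set construction by a flag-array sweep over the remaining sequences (alternative decomposition, same cost).

-- ===== PORT A =====
-- seq[i] is a single character; ported as Char via PySem.Str.pyGet? (total via getD — only reached under Pre_, where the index is in range).
def compare_sequences (sequences : List String) : List Bool :=
  if sequences = [] then []
  else
    let length := PySem.Str.len (sequences.headD "")
    (PySem.List.pyRange 0 length 1).foldl (fun comparison i =>
      let chars_at_pos_i := sequences.map (fun seq => (PySem.Str.pyGet? seq i).getD ' ')
      let all_same := PySem.Set.len (PySem.Set.ofList chars_at_pos_i) == 1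
      comparison ++ [all_same]) []

-- ===== PORT B =====
def compare_sequences_alt (sequences : List String) : List Bool :=
  match sequences with
  | [] => []
  | first :: rest =>
    let length := PySem.Str.len first
    rest.foldl (fun result seq =>
      (PySem.List.pyRange 0 length 1).foldl (fun res i =>
        if ((PySem.Str.pyGet? seq i).getD ' ' != (PySem.Str.pyGet? first i).getD ' ')
        then PySem.List.pySetD res i false else res) result)
      (List.replicate length.toNat true)

-- ===== PRECONDITION & SPEC =====
-- Pre_ excludes exactly the inputs on which Python A raises IndexError: some sequence shorter than sequences[0].
def Pre_compare_sequences (sequences : List String) : Prop :=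
  ∀ s ∈ sequences, (sequences.headD "").toList.length ≤ s.toList.length
instance (sequences : List String) : Decidable (Pre_compare_sequences sequences) := by unfold Pre_compare_sequences; infer_instance
def pvWitness_compare_sequences : List String := ["ab", "ac", "abX"]
def Spec_compare_sequences (sequences : List String) (out : List Bool) : Prop := out = compare_sequences_alt sequences
instance (sequences : List String) (out : List Bool) : Decidable (Spec_compare_sequences sequences out) := by unfold Spec_compare_sequences; infer_instance

-- ===== CLAIM (what is proved, stated in full; the proofs are below) =====
def Claim_equal_compare_sequences : Prop := ∀ (sequences : List String), Dom_compare_sequences sequences → Pre_compare_sequences sequences → Spec_compare_sequences sequences (compare_sequences sequences)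

-- ===== LEMMAS AND PROOFS =====

-- character of s at position i, as the ports read it
def pvCharD (s : String) (i : Int) : Char := (PySem.Str.pyGet? s i).getD ' '

-- facts about PySem.Set specific to the "len(set(chars)) == 1" test of port A
theorem pv_le_length_foldl_add (xs : List Char) (s : PySem.Set Char) :
    s.length ≤ (xs.foldl PySem.Set.add s).length := by
  induction xs generalizing s with
  | nil => simp
  | cons y ys ih =>
    refine le_trans ?_ (ih (PySem.Set.add s y))
    simp only [PySem.Set.add]
    split <;> simp

theorem pv_set_len_one (x : Char) (xs : List Char) :
    (PySem.Set.len (PySem.Set.ofList (x :: xs)) == 1) = xs.all (fun y => y == x) := by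
  induction xs with
  | nil => rfl
  | cons y ys ih =>
    by_cases h : y = x
    · subst h
      have e : PySem.Set.ofList (y :: y :: ys) = PySem.Set.ofList (y :: ys) := by
        simp [PySem.Set.ofList, PySem.Set.add]
      rw [e, ih]
      simp
    · have e : PySem.Set.ofList (x :: y :: ys) = ys.foldl PySem.Set.add [x, y] := by
        simp [PySem.Set.ofList, PySem.Set.add, h]
      have h2 : 2 ≤ (PySem.Set.ofList (x :: y :: ys)).length := by
        rw [e]; exact pv_le_length_foldl_add ys [x, y]
      have hx : (PySem.Set.len (PySem.Set.ofList (x :: y :: ys)) == 1) = false := by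
        simp only [PySem.Set.len]
        rw [beq_eq_false_iff_ne]
        intro hc
        have : (PySem.Set.ofList (x :: y :: ys)).length = 1 := by exact_mod_cast hc
        omega
      rw [hx]
      simp [List.all_cons, h]

-- B's inner index loop clears exactly the positions (below m) where seq disagrees with first
theorem pv_inner_eq (seq first : String) (m : Nat) (res : List Bool) :
    (PySem.List.pyRange 0 (m : Int) 1).foldl (fun res i =>
        if ((PySem.Str.pyGet? seq i).getD ' ' != (PySem.Str.pyGet? first i).getD ' ')
        then PySem.List.pySetD res i false else res) res
    = res.mapIdx (fun k b =>
        if k < m ∧ (pvCharD seq (k : Int) != pvCharD first (k : Int)) = true then false else b) := by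
  induction m generalizing res with
  | zero =>
    rw [PySem.List.pyRange_one_eq_nil (by simp)]
    simp only [List.foldl_nil]
    apply List.ext_getElem <;> simp
  | succ m ih =>
    have hcast : ((m + 1 : Nat) : Int) = (m : Int) + 1 := by push_cast; ring
    rw [hcast, PySem.List.pyRange_one_succ_right (by positivity), List.foldl_append]
    simp only [List.foldl_cons, List.foldl_nil]
    rw [ih]
    by_cases hc : (pvCharD seq (m : Int) != pvCharD first (m : Int)) = true
    · rw [if_pos (by simpa [pvCharD] using hc), PySem.List.pySetD_natCast]
      apply List.ext_getElem
      · simp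
      · intro k hk hk'
        simp only [List.getElem_set, List.getElem_mapIdx]
        rcases eq_or_ne m k with h | h
        · subst h
          rw [if_pos rfl, if_pos ⟨Nat.lt_succ_self m, hc⟩]
        · rw [if_neg h]
          by_cases hck : (pvCharD seq (k : Int) != pvCharD first (k : Int)) = true
          · simp only [hck, and_true]
            split_ifs <;> first | rfl | omega
          · simp [hck]
    · rw [if_neg (by simpa [pvCharD] using hc)]
      apply List.ext_getElem
      · simp
      · intro k hk hk'
        simp only [List.getElem_mapIdx]
        rcases eq_or_ne m k with h | h
        · subst h
          simp [hc]
        · by_cases hck : (pvCharD seq (k : Int) != pvCharD first (k : Int)) = true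
          · simp only [hck, and_true]
            split_ifs <;> first | rfl | omega
          · simp [hck]

-- B's outer sweep ANDs, per position, agreement with first over all swept sequences
theorem pv_outer_eq (first : String) (n : Nat) (L : List String) (res : List Bool)
    (hres : res.length = n) :
    L.foldl (fun result seq =>
      (PySem.List.pyRange 0 (n : Int) 1).foldl (fun res i =>
          if ((PySem.Str.pyGet? seq i).getD ' ' != (PySem.Str.pyGet? first i).getD ' ')
          then PySem.List.pySetD res i false else res) result) res
    = res.mapIdx (fun k b =>
        b && L.all (fun s => pvCharD s (k : Int) == pvCharD first (k : Int))) := by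
  induction L generalizing res with
  | nil =>
    simp only [List.foldl_nil, List.all_nil, Bool.and_true]
    apply List.ext_getElem <;> simp
  | cons s L ih =>
    simp only [List.foldl_cons]
    rw [pv_inner_eq s first n res, ih _ (by simp [hres])]
    apply List.ext_getElem
    · simp
    · intro k hk hk'
      simp only [List.getElem_mapIdx, List.all_cons]
      have hkn : k < n := by simp at hk'; omega
      by_cases hc : (pvCharD s (k : Int) != pvCharD first (k : Int)) = true
      · rw [if_pos ⟨hkn, hc⟩]
        simp only [bne_iff_ne, ne_eq] at hc
        simp [hc]
      · rw [if_neg (by tauto)]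
        simp only [bne_iff_ne, ne_eq, not_not] at hc
        simp [hc]

-- ===== VERDICT (by name: the statement is the Claim_ definition above) =====
theorem compare_sequences_spec : Claim_equal_compare_sequences := by
  intro sequences _ _
  unfold Spec_compare_sequences compare_sequences compare_sequences_alt
  match sequences with
  | [] => rfl
  | first :: rest =>
    rw [if_neg (by simp)]
    simp only [List.headD_cons, PySem.Str.len_eq, Int.toNat_natCast]
    rw [PySem.List.foldl_append_singleton_eq_map, List.nil_append]
    rw [pv_outer_eq first first.toList.length rest (List.replicate first.toList.length true)
        (by simp)]
    rw [PySem.List.pyRange_one]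
    apply List.ext_getElem
    · simp
    · intro k hk hk'
      simp only [List.getElem_map, List.getElem_mapIdx, List.getElem_range,
        List.getElem_replicate, Bool.true_and, List.map_cons, zero_add]
      rw [pv_set_len_one]
      rw [List.all_map]
      exact List.all_congr rfl (fun s => by simp [pvCharD])
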